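-- pv_equiv track=rewrite | github.com/HengXin666/HX-Ass-Skill | reference/案例/羽ばたきのバースデイ/generate_habataki.py | fx_op3
-- ===== SOURCE A (Python) =====
-- def ft(ms):
--     if ms<0: ms=0
--     h=ms//3600000; ms%=3600000; m=ms//60000; ms%=60000; s=ms//1000; cs=(ms%1000)//10
--     return f"{h}:{m:02d}:{s:02d}.{cs:02d}"
--
-- def fx_op3(syls,s,e,pos,is2=False):
--     """OPJP3: 双行 (highlight+lead-in+lead-out)"""
--     fx=[]; sty="OPJP 3-2" if is2 else "OPJP 3-1"; y=58 if is2 else 23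
--     for i,(d,t) in enumerate(syls):
--         if not t.strip(): continue
--         ss=s+sum(x*10 for x,_ in syls[:i]); sd=d*10; se=ss+sd; cx=pos[i][0]
--         fx.append(f"Dialogue: 1,{ft(ss)},{ft(se)},{sty},,0,0,0,fx,{{\\an5\\pos({cx:.0f},{y})\\fscx100\\fscy100\\t(0,200,\\fscx130\\fscy130)\\t(200,{sd},\\3c&HFFFFFF&\\fscx100\\fscy100)}}{t}")
--         fx.append(f"Dialogue: 0,{ft(max(s-100,0))},{ft(ss)},{sty},,0,0,0,fx,{{\\an5\\pos({cx:.0f},{y})\\3c&HFFFFFF&\\fscy130\\t(0,500,\\fscy100)\\fad(500,0)}}{t}")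
--         fx.append(f"Dialogue: 1,{ft(se)},{ft(e)},{sty},,0,0,0,fx,{{\\an5\\pos({cx:.0f},{y})\\fad(0,200)}}{t}")
--     return fx
-- ===== SOURCE B (Python) =====
-- def ft(ms):
--     if ms<0: ms=0
--     h=ms//3600000; ms%=3600000; m=ms//60000; ms%=60000; s=ms//1000; cs=(ms%1000)//10
--     return f"{h}:{m:02d}:{s:02d}.{cs:02d}"
--
-- def fx_op3(syls,s,e,pos,is2=False):
--     """OPJP3: 双行 (highlight+lead-in+lead-out) — prefix-sum table first, then one assembly pass"""
--     sty="OPJP 3-2" if is2 else "OPJP 3-1"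
--     y=58 if is2 else 23
--     # pass 1: cum[i] = sum of scaled durations of all syllables before i (skipped ones included)
--     cum=[]
--     total=0
--     for d,_ in syls:
--         cum.append(total)
--         total+=d*10
--     lead_in=ft(max(s-100,0))
--     outro=ft(e)
--     # pass 2: assemble the three dialogue lines per visible syllable
--     out=[]
--     for i,(d,t) in enumerate(syls):
--         if not t.strip():
--             continue
--         ss=s+cum[i]; sd=d*10; se=ss+sd
--         anchor=f"\\an5\\pos({pos[i][0]:.0f},{y})"
--         def dlg(layer,t1,t2,body):
--             return f"Dialogue: {layer},{t1},{t2},{sty},,0,0,0,fx,{{{anchor}{body}}}{t}"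
--         out.append(dlg(1,ft(ss),ft(se),f"\\fscx100\\fscy100\\t(0,200,\\fscx130\\fscy130)\\t(200,{sd},\\3c&HFFFFFF&\\fscx100\\fscy100)"))
--         out.append(dlg(0,lead_in,ft(ss),"\\3c&HFFFFFF&\\fscy130\\t(0,500,\\fscy100)\\fad(500,0)"))
--         out.append(dlg(1,ft(se),outro,"\\fad(0,200)"))
--     return out
-- ===== Notes on version B (the rewrite author's own statement) =====
-- stated objective: alternative
-- what changed: B builds a prefix-sum table of the scaled syllable durations in one pass and then assembles the lines in a second pass via a shared anchor/dlg helper, instead of re-summing syls[:i] inside every iteration (intended as faster; a timing run read ~1.5x at the largest size but could not confirm it consistently).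
import Mathlib
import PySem

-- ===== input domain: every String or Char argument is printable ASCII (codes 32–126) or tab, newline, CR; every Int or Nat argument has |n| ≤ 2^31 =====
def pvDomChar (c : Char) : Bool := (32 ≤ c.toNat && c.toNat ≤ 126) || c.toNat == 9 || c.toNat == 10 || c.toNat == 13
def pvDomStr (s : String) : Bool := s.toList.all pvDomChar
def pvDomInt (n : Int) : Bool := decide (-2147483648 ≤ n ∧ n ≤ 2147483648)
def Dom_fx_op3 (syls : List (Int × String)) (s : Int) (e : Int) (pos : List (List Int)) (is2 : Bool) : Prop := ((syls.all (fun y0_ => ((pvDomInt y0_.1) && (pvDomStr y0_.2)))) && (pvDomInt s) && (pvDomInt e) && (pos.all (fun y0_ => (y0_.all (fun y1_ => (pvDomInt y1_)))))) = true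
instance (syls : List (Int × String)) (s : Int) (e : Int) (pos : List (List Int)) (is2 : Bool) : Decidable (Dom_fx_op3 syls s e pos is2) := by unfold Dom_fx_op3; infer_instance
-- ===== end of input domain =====

-- B restructures fx_op3: a first pass builds a prefix-sum table of scaled durations, then a second
-- pass assembles each line from a shared anchor/dlg decomposition instead of re-summing syls[:i]
-- per iteration (objective: alternative decomposition).

-- ===== PORT A =====
-- shared helper ft (identical in Source A and Source B); f"{m:02d}" = str(m).zfill(2) (exact for ints)
def ft (ms : Int) : String :=
  let ms := if ms < 0 then 0 else ms
  let h := PySem.Int.floordiv ms 3600000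
  let ms := PySem.Int.mod ms 3600000
  let m := PySem.Int.floordiv ms 60000
  let ms := PySem.Int.mod ms 60000
  let s := PySem.Int.floordiv ms 1000
  let cs := PySem.Int.floordiv (PySem.Int.mod ms 1000) 10
  PySem.Int.toStr h ++ ":" ++ PySem.Str.zfill (PySem.Int.toStr m) 2 ++ ":" ++
    PySem.Str.zfill (PySem.Int.toStr s) 2 ++ "." ++ PySem.Str.zfill (PySem.Int.toStr cs) 2

-- f"{cx:.0f}" on a Python int prints the integer itself (exact on |cx| ≤ 2^31): PySem.Int.toStr.
-- pos[i][0] raises IndexError when i ≥ len(pos) or pos[i] = []; Pre_ excludes that, the port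
-- uses .getD 0 there.
def fx_op3 (syls : List (Int × String)) (s : Int) (e : Int) (pos : List (List Int)) (is2 : Bool) : List String :=
  let sty := if is2 then "OPJP 3-2" else "OPJP 3-1"
  let y : Int := if is2 then 58 else 23
  (PySem.List.enumerate syls 0).foldl (fun fx it =>
    let i := it.1
    let d := it.2.1
    let t := it.2.2
    if PySem.Str.strip t = "" then fx
    else
      let ss := s + ((PySem.List.slice syls none (some i)).map (fun p => p.1 * 10)).sum
      let sd := d * 10
      let se := ss + sd
      let cx := ((PySem.List.pyGet? pos i).bind (fun row => PySem.List.pyGet? row 0)).getD 0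
      fx ++ ["Dialogue: 1," ++ ft ss ++ "," ++ ft se ++ "," ++ sty ++ ",,0,0,0,fx,{\\an5\\pos(" ++ PySem.Int.toStr cx ++ "," ++ PySem.Int.toStr y ++ ")\\fscx100\\fscy100\\t(0,200,\\fscx130\\fscy130)\\t(200," ++ PySem.Int.toStr sd ++ ",\\3c&HFFFFFF&\\fscx100\\fscy100)}" ++ t,
            "Dialogue: 0," ++ ft (max (s - 100) 0) ++ "," ++ ft ss ++ "," ++ sty ++ ",,0,0,0,fx,{\\an5\\pos(" ++ PySem.Int.toStr cx ++ "," ++ PySem.Int.toStr y ++ ")\\3c&HFFFFFF&\\fscy130\\t(0,500,\\fscy100)\\fad(500,0)}" ++ t,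
            "Dialogue: 1," ++ ft se ++ "," ++ ft e ++ "," ++ sty ++ ",,0,0,0,fx,{\\an5\\pos(" ++ PySem.Int.toStr cx ++ "," ++ PySem.Int.toStr y ++ ")\\fad(0,200)}" ++ t]) []

-- ===== PORT B =====
-- pass 1 of Source B: cum[i] = running total of d*10 before index i
def cumScaled (total : Int) : List (Int × String) → List Int
  | [] => []
  | p :: rest => total :: cumScaled (total + p.1 * 10) rest

-- Source B's local helper dlg(layer, t1, t2, body) closing over sty/anchor/t
def dlg (sty anchor t : String) (layer t1 t2 body : String) : String :=
  "Dialogue: " ++ layer ++ "," ++ t1 ++ "," ++ t2 ++ "," ++ sty ++ ",,0,0,0,fx,{" ++ anchor ++ body ++ "}" ++ t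

def fx_op3_alt (syls : List (Int × String)) (s : Int) (e : Int) (pos : List (List Int)) (is2 : Bool) : List String :=
  let sty := if is2 then "OPJP 3-2" else "OPJP 3-1"
  let y : Int := if is2 then 58 else 23
  let cum := cumScaled 0 syls
  let leadIn := ft (max (s - 100) 0)
  let outro := ft e
  (PySem.List.enumerate syls 0).foldl (fun out it =>
    let i := it.1
    let d := it.2.1
    let t := it.2.2
    if PySem.Str.strip t = "" then out
    else
      let ss := s + (PySem.List.pyGet? cum i).getD 0
      let sd := d * 10
      let se := ss + sd
      let anchor := "\\an5\\pos(" ++ PySem.Int.toStr (((PySem.List.pyGet? pos i).bind (fun row => PySem.List.pyGet? row 0)).getD 0) ++ "," ++ PySem.Int.toStr y ++ ")"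
      out ++ [dlg sty anchor t "1" (ft ss) (ft se) ("\\fscx100\\fscy100\\t(0,200,\\fscx130\\fscy130)\\t(200," ++ PySem.Int.toStr sd ++ ",\\3c&HFFFFFF&\\fscx100\\fscy100)"),
              dlg sty anchor t "0" leadIn (ft ss) "\\3c&HFFFFFF&\\fscy130\\t(0,500,\\fscy100)\\fad(500,0)",
              dlg sty anchor t "1" (ft se) outro "\\fad(0,200)"]) []

-- ===== PRECONDITION & SPEC =====
-- Pre_ excludes exactly the inputs on which A raises IndexError at pos[i][0]: a syllable with
-- non-empty stripped text whose index has no first element in pos.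
def Pre_fx_op3 (syls : List (Int × String)) (s : Int) (e : Int) (pos : List (List Int)) (is2 : Bool) : Prop :=
  ((PySem.List.enumerate syls 0).all (fun it =>
    (PySem.Str.strip it.2.2 == "") || ((PySem.List.pyGet? pos it.1).bind (fun row => PySem.List.pyGet? row 0)).isSome)) = true
instance (syls : List (Int × String)) (s : Int) (e : Int) (pos : List (List Int)) (is2 : Bool) : Decidable (Pre_fx_op3 syls s e pos is2) := by unfold Pre_fx_op3; infer_instance

def pvWitness_fx_op3 : (List (Int × String)) × Int × Int × List (List Int) × Bool :=
  ([(5, "ha"), (3, " ")], 1000, 2000, [[100], []], false)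

def Spec_fx_op3 (syls : List (Int × String)) (s : Int) (e : Int) (pos : List (List Int)) (is2 : Bool) (out : List String) : Prop := out = fx_op3_alt syls s e pos is2
instance (syls : List (Int × String)) (s : Int) (e : Int) (pos : List (List Int)) (is2 : Bool) (out : List String) : Decidable (Spec_fx_op3 syls s e pos is2 out) := by unfold Spec_fx_op3; infer_instance

-- ===== CLAIM (what is proved, stated in full; the proofs are below) =====
def Claim_equal_fx_op3 : Prop := ∀ (syls : List (Int × String)) (s : Int) (e : Int) (pos : List (List Int)) (is2 : Bool), Dom_fx_op3 syls s e pos is2 → Pre_fx_op3 syls s e pos is2 → Spec_fx_op3 syls s e pos is2 (fx_op3 syls s e pos is2)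

-- ===== LEMMAS AND PROOFS =====

-- the prefix-sum table agrees with the per-iteration re-summation of A
lemma cumScaled_get (syls : List (Int × String)) (total : Int) (k : Nat) (hk : k < syls.length) :
    (cumScaled total syls)[k]?
      = some (total + ((syls.take k).map (fun p => p.1 * 10)).sum) := by
  induction syls generalizing total k with
  | nil => simp at hk
  | cons p rest ih =>
      cases k with
      | zero => simp [cumScaled]
      | succ k =>
          have hk' : k < rest.length := by simpa using hk
          simp only [cumScaled, List.getElem?_cons_succ, ih (total + p.1 * 10) k hk',
            List.take_succ_cons, List.map_cons, List.sum_cons, Option.some.injEq]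
          ring

-- strings are compared on their character lists
lemma str_toList_inj {a b : String} (h : a.toList = b.toList) : a = b :=
  String.toList_inj.mp h

-- fuse two adjacent string literals inside a right-associated character-list chain
lemma cfuse (a b c : String) (h : c.toList = a.toList ++ b.toList) (r : List Char) :
    a.toList ++ (b.toList ++ r) = c.toList ++ r := by
  rw [← List.append_assoc, h]

-- Source B's dlg helper assembles exactly A's first f-string
lemma dlg_line1 (sty cxs ys t s1 s2 sds : String) :
    "Dialogue: 1," ++ s1 ++ "," ++ s2 ++ "," ++ sty ++ ",,0,0,0,fx,{\\an5\\pos(" ++ cxs ++ "," ++ ys ++ ")\\fscx100\\fscy100\\t(0,200,\\fscx130\\fscy130)\\t(200," ++ sds ++ ",\\3c&HFFFFFF&\\fscx100\\fscy100)}" ++ t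
      = dlg sty ("\\an5\\pos(" ++ cxs ++ "," ++ ys ++ ")") t "1" s1 s2 ("\\fscx100\\fscy100\\t(0,200,\\fscx130\\fscy130)\\t(200," ++ sds ++ ",\\3c&HFFFFFF&\\fscx100\\fscy100)") := by
  apply str_toList_inj
  simp only [dlg, String.toList_append, List.append_assoc]
  rw [cfuse "Dialogue: " "1" "Dialogue: 1" rfl,
      cfuse "Dialogue: 1" "," "Dialogue: 1," rfl,
      cfuse ",,0,0,0,fx,{" "\\an5\\pos(" ",,0,0,0,fx,{\\an5\\pos(" rfl,
      cfuse ")" "\\fscx100\\fscy100\\t(0,200,\\fscx130\\fscy130)\\t(200," ")\\fscx100\\fscy100\\t(0,200,\\fscx130\\fscy130)\\t(200," rfl,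
      cfuse ",\\3c&HFFFFFF&\\fscx100\\fscy100)" "}" ",\\3c&HFFFFFF&\\fscx100\\fscy100)}" rfl]

-- … A's second f-string
lemma dlg_line2 (sty cxs ys t s1 s2 : String) :
    "Dialogue: 0," ++ s1 ++ "," ++ s2 ++ "," ++ sty ++ ",,0,0,0,fx,{\\an5\\pos(" ++ cxs ++ "," ++ ys ++ ")\\3c&HFFFFFF&\\fscy130\\t(0,500,\\fscy100)\\fad(500,0)}" ++ t
      = dlg sty ("\\an5\\pos(" ++ cxs ++ "," ++ ys ++ ")") t "0" s1 s2 "\\3c&HFFFFFF&\\fscy130\\t(0,500,\\fscy100)\\fad(500,0)" := by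
  apply str_toList_inj
  simp only [dlg, String.toList_append, List.append_assoc]
  rw [cfuse "Dialogue: " "0" "Dialogue: 0" rfl,
      cfuse "Dialogue: 0" "," "Dialogue: 0," rfl,
      cfuse ",,0,0,0,fx,{" "\\an5\\pos(" ",,0,0,0,fx,{\\an5\\pos(" rfl,
      cfuse ")" "\\3c&HFFFFFF&\\fscy130\\t(0,500,\\fscy100)\\fad(500,0)" ")\\3c&HFFFFFF&\\fscy130\\t(0,500,\\fscy100)\\fad(500,0)" rfl,
      cfuse ")\\3c&HFFFFFF&\\fscy130\\t(0,500,\\fscy100)\\fad(500,0)" "}" ")\\3c&HFFFFFF&\\fscy130\\t(0,500,\\fscy100)\\fad(500,0)}" rfl]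

-- … A's third f-string
lemma dlg_line3 (sty cxs ys t s1 s2 : String) :
    "Dialogue: 1," ++ s1 ++ "," ++ s2 ++ "," ++ sty ++ ",,0,0,0,fx,{\\an5\\pos(" ++ cxs ++ "," ++ ys ++ ")\\fad(0,200)}" ++ t
      = dlg sty ("\\an5\\pos(" ++ cxs ++ "," ++ ys ++ ")") t "1" s1 s2 "\\fad(0,200)" := by
  apply str_toList_inj
  simp only [dlg, String.toList_append, List.append_assoc]
  rw [cfuse "Dialogue: " "1" "Dialogue: 1" rfl,
      cfuse "Dialogue: 1" "," "Dialogue: 1," rfl,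
      cfuse ",,0,0,0,fx,{" "\\an5\\pos(" ",,0,0,0,fx,{\\an5\\pos(" rfl,
      cfuse ")" "\\fad(0,200)" ")\\fad(0,200)" rfl,
      cfuse ")\\fad(0,200)" "}" ")\\fad(0,200)}" rfl]

theorem fx_op3_spec : Claim_equal_fx_op3 := by
  intro syls s e pos is2 _hdom _hpre
  unfold Spec_fx_op3 fx_op3 fx_op3_alt
  apply PySem.List.foldl_congr_mem
  intro acc it hmem
  rcases (PySem.List.mem_enumerate_iff _ _ _).1 hmem with ⟨k, hk, rfl⟩
  simp only [zero_add]
  by_cases hstrip : PySem.Str.strip (syls[k]).2 = ""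
  · simp [hstrip]
  · have hslice : PySem.List.slice syls none (some (k : Int)) = syls.take k :=
      PySem.List.slice_to_natCast syls k
    simp only [if_neg hstrip, hslice, PySem.List.pyGet?_natCast,
      cumScaled_get syls 0 k hk, Option.getD_some, zero_add]
    rw [dlg_line1, dlg_line2, dlg_line3]
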